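-- pv_equiv track=rewrite | github.com/mindfu23/Postboi | services/share_manager.py | get_summary
-- ===== SOURCE A (Python) =====
-- from typing import Dict, List, Tuple, Optional
--
-- def get_summary(results: Dict[str, Tuple[bool, str]]) -> str:
--     """
--     Generate a summary message from sharing results.
--
--     Args:
--         results: Dictionary of platform results
--
--     Returns:
--         Formatted summary string
--     """
--     successful = [platform for platform, (success, _) in results.items() if success]
--     failed = [platform for platform, (success, _) in results.items() if not success]
--
--     summary_parts = []
--
--     if successful:
--         summary_parts.append(f"✅ Successfully posted to: {', '.join(successful)}")
--
--     if failed: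
--         summary_parts.append(f"❌ Failed to post to: {', '.join(failed)}")
--
--     # Add details
--     for platform, (success, message) in results.items():
--         emoji = "✅" if success else "❌"
--         summary_parts.append(f"\n{emoji} {platform}: {message}")
--
--     return '\n'.join(summary_parts)
-- ===== SOURCE B (Python) =====
-- def get_summary(results):
--     """Reverse walk building the joined strings directly (no intermediate lists/joins)."""
--     succ = fail = None
--     details = ""
--     for platform, (success, message) in reversed(list(results.items())):
--         if success:
--             succ = platform if succ is None else platform + ", " + succ
--             details = "\n\n\u2705 " + platform + ": " + message + details
--         else:
--             fail = platform if fail is None else platform + ", " + fail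
--             details = "\n\n\u274c " + platform + ": " + message + details
--     header = ""
--     if succ is not None:
--         header = "\u2705 Successfully posted to: " + succ
--     if fail is not None:
--         header += ("\n" if header else "") + "\u274c Failed to post to: " + fail
--     return header + details
-- ===== Notes on version B (the rewrite author's own statement) =====
-- stated objective: alternative
-- what changed: Instead of A's list machinery (two filtering comprehensions, a parts list, and str.join calls), B walks the items once in reverse and builds the two comma-joined header strings and the detail block directly by string prepending, then concatenates header and details; no intermediate lists or joins exist.
import Mathlib
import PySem

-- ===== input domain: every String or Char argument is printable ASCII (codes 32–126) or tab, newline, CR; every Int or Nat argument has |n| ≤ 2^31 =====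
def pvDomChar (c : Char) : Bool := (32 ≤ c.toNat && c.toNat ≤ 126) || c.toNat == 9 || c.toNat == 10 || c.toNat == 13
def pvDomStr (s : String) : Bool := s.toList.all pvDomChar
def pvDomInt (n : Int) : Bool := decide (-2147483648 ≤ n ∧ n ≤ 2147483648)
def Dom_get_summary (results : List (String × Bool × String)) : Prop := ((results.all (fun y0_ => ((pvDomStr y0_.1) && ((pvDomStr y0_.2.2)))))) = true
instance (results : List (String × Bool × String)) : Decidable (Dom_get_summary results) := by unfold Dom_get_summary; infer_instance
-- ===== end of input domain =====

-- B walks the dict once in reverse, building the two comma-joined header strings and the detail block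
-- directly by string prepending (no intermediate lists and no join calls) — alternative decomposition.


-- ===== PORT A =====
def get_summary (results : List (String × Bool × String)) : String :=
  let successful := (results.filter (fun x => x.2.1)).map (fun x => x.1)
  let failed := (results.filter (fun x => !x.2.1)).map (fun x => x.1)
  let summary_parts : List String := []
  let summary_parts := if successful ≠ [] then
      summary_parts ++ ["✅ Successfully posted to: " ++ PySem.Str.join ", " successful]
    else summary_parts
  let summary_parts := if failed ≠ [] then
      summary_parts ++ ["❌ Failed to post to: " ++ PySem.Str.join ", " failed]
    else summary_parts
  let summary_parts := results.foldl (fun acc x =>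
      let emoji := if x.2.1 then "✅" else "❌"
      acc ++ ["\n" ++ emoji ++ " " ++ x.1 ++ ": " ++ x.2.2]) summary_parts
  PySem.Str.join "\n" summary_parts

-- ===== PORT B =====
-- the for-loop over reversed(list(results.items())) with three string accumulators is a foldr
def get_summary_alt (results : List (String × Bool × String)) : String :=
  let st := results.foldr (fun x (acc : Option String × Option String × String) =>
      if x.2.1 then
        (some (match acc.1 with | none => x.1 | some t => x.1 ++ ", " ++ t), acc.2.1,
         "\n\n✅ " ++ x.1 ++ ": " ++ x.2.2 ++ acc.2.2)
      else
        (acc.1,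
         some (match acc.2.1 with | none => x.1 | some t => x.1 ++ ", " ++ t),
         "\n\n❌ " ++ x.1 ++ ": " ++ x.2.2 ++ acc.2.2))
    (none, none, "")
  let header := match st.1 with
    | none => ""
    | some s => "✅ Successfully posted to: " ++ s
  let header := match st.2.1 with
    | none => header
    | some f => header ++ (if header ≠ "" then "\n" else "") ++ "❌ Failed to post to: " ++ f
  header ++ st.2.2

-- ===== PRECONDITION & SPEC =====
def Spec_get_summary (results : List (String × Bool × String)) (out : String) : Prop := out = get_summary_alt results
instance (results : List (String × Bool × String)) (out : String) : Decidable (Spec_get_summary results out) := by unfold Spec_get_summary; infer_instance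

-- ===== CLAIM (what is proved, stated in full; the proofs are below) =====
def Claim_equal_get_summary : Prop := ∀ (results : List (String × Bool × String)), Dom_get_summary results → Spec_get_summary results (get_summary results)

-- ===== LEMMAS AND PROOFS =====

-- recursive string join, the shape B's accumulators build
def sjoin (sep : String) : List String → String
  | [] => ""
  | [a] => a
  | a :: b :: r => a ++ sep ++ sjoin sep (b :: r)

theorem join_eq_sjoin (sep : String) (l : List String) : PySem.Str.join sep l = sjoin sep l := by
  induction l with
  | nil => rfl
  | cons a r ih =>
    cases r with
    | nil => simp [PySem.Str.join, PySem.Chars.join_singleton, sjoin]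
    | cons b r' =>
      have hstep : PySem.Str.join sep (a :: b :: r') = a ++ sep ++ PySem.Str.join sep (b :: r') := by
        show String.ofList (PySem.Chars.join sep.toList
            (a.toList :: b.toList :: r'.map String.toList)) = _
        rw [PySem.Chars.join_cons_cons, String.ofList_append, String.ofList_append,
          String.ofList_toList, String.ofList_toList]
        rfl
      rw [hstep, ih]
      rfl

-- B's per-entry detail string
def detB (x : String × Bool × String) : String :=
  if x.2.1 then "\n\n✅ " ++ x.1 ++ ": " ++ x.2.2 else "\n\n❌ " ++ x.1 ++ ": " ++ x.2.2

-- joining a nonempty list: head, then separator-prefixed tail entries concatenated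
theorem sjoin_cons (sep h : String) (ds : List String) :
    sjoin sep (h :: ds) = h ++ ds.foldr (fun a acc => sep ++ a ++ acc) "" := by
  induction ds generalizing h with
  | nil => simp [sjoin]
  | cons d ds' ih =>
    rw [sjoin, ih d]
    simp [String.append_assoc]

-- the separator-prefixed concatenation of A's detail lines is B's detail block
theorem detfold (results : List (String × Bool × String)) :
    (results.map (fun x => "\n" ++ (if x.2.1 then "✅" else "❌") ++ " " ++ x.1 ++ ": " ++ x.2.2)).foldr
        (fun a acc => "\n" ++ a ++ acc) ""
      = results.foldr (fun x acc => detB x ++ acc) "" := by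
  induction results with
  | nil => rfl
  | cons x r ih =>
    simp only [List.map_cons, List.foldr_cons, ih]
    by_cases h : x.2.1 = true
    · simp only [h, if_true, detB, ← String.append_assoc]
      rw [show ("\n" ++ "\n" ++ "✅" ++ " " : String) = "\n\n✅ " from rfl]
    · simp only [h, Bool.false_eq_true, if_false, detB, ← String.append_assoc]
      rw [show ("\n" ++ "\n" ++ "❌" ++ " " : String) = "\n\n❌ " from rfl]

def optJoin (l : List String) : Option String :=
  match l with
  | [] => none
  | a :: r => some (sjoin ", " (a :: r))

-- B's single fold computes the optional joined header strings and the detail block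
theorem fold_char (results : List (String × Bool × String)) :
    results.foldr (fun x (acc : Option String × Option String × String) =>
      if x.2.1 then
        (some (match acc.1 with | none => x.1 | some t => x.1 ++ ", " ++ t), acc.2.1,
         "\n\n✅ " ++ x.1 ++ ": " ++ x.2.2 ++ acc.2.2)
      else
        (acc.1,
         some (match acc.2.1 with | none => x.1 | some t => x.1 ++ ", " ++ t),
         "\n\n❌ " ++ x.1 ++ ": " ++ x.2.2 ++ acc.2.2))
    (none, none, "")
    = (optJoin ((results.filter (fun x => x.2.1)).map (fun x => x.1)),
       optJoin ((results.filter (fun x => !x.2.1)).map (fun x => x.1)),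
       results.foldr (fun x acc => detB x ++ acc) "") := by
  induction results with
  | nil => rfl
  | cons x r ih =>
    rw [List.foldr_cons, ih]
    by_cases h : x.2.1 = true <;>
      cases hsucc : (r.filter (fun x => x.2.1)).map (fun x => x.1) <;>
      cases hfail : (r.filter (fun x => !x.2.1)).map (fun x => x.1) <;>
      simp [h, optJoin, detB, sjoin, hsucc, hfail]

theorem filters_nil (results : List (String × Bool × String))
    (hs : (results.filter (fun x => x.2.1)).map (fun x => x.1) = [])
    (hf : (results.filter (fun x => !x.2.1)).map (fun x => x.1) = []) : results = [] := by
  cases results with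
  | nil => rfl
  | cons x r =>
    by_cases h : x.2.1 = true
    · simp [h] at hs
    · simp [h] at hf

theorem hdr_ne (s : String) : ("✅ Successfully posted to: " ++ s) ≠ "" := by
  intro h
  have := congrArg String.length h
  simp [String.length_append] at this

-- ===== VERDICT (by name: the statement is the Claim_ definition above) =====
theorem get_summary_spec : Claim_equal_get_summary := by
  intro results _
  unfold Spec_get_summary get_summary get_summary_alt
  rw [fold_char]
  cases hs : (results.filter (fun x => x.2.1)).map (fun x => x.1) with
  | nil =>
    cases hf : (results.filter (fun x => !x.2.1)).map (fun x => x.1) with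
    | nil =>
      rw [filters_nil results hs hf]
      rfl
    | cons b m =>
      simp only [optJoin, ne_eq, reduceCtorEq, not_false_eq_true, not_true_eq_false,
        if_true, if_false, List.nil_append, List.singleton_append, String.empty_append,
        PySem.List.foldl_append_singleton_eq_map, join_eq_sjoin, sjoin_cons, detfold]
  | cons a l =>
    cases hf : (results.filter (fun x => !x.2.1)).map (fun x => x.1) with
    | nil =>
      simp only [optJoin, ne_eq, reduceCtorEq, not_false_eq_true, not_true_eq_false,
        if_true, if_false, List.nil_append, List.singleton_append,
        PySem.List.foldl_append_singleton_eq_map, join_eq_sjoin, sjoin_cons, detfold]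
    | cons b m =>
      simp only [optJoin, ne_eq, reduceCtorEq, not_false_eq_true, if_true,
        List.nil_append, List.cons_append,
        PySem.List.foldl_append_singleton_eq_map, join_eq_sjoin,
        sjoin_cons, List.foldr_cons, detfold]
      rw [if_pos (hdr_ne _)]
      simp [String.append_assoc]
      rw [← String.append_assoc,
        show ("\n" ++ "❌ Failed to post to: " : String) = "\n❌ Failed to post to: " from rfl]
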